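-- pv_equiv track=rewrite | github.com/lasttillend/CS61A | mentor/CSM4.py | waffle
-- ===== SOURCE A (Python) =====
-- def waffle(n):
-- 	i = 0
-- 	total = 0
-- 	while i < n:
-- 		for j in range(50 * n):
-- 			total += 1
-- 		i += 1
-- 	return total
-- ===== SOURCE B (Python) =====
-- def waffle(n):
--     return 50 * n * n if n > 0 else 0
-- ===== Notes on version B (the rewrite author's own statement) =====
-- stated objective: faster
-- what changed: Replaced the nested counting loops (n iterations each incrementing a counter 50*n times) by the closed form 50*n*n for n>0, else 0.
import Mathlib
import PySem

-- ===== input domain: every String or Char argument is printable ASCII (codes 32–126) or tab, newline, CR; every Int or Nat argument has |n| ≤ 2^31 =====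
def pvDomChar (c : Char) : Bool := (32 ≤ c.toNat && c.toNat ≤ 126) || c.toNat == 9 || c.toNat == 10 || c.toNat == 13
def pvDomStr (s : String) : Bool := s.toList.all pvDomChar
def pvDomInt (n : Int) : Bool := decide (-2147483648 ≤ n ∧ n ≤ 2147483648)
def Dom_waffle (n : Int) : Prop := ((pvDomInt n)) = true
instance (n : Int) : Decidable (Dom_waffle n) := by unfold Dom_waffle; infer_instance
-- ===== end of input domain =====

-- B replaces A's nested counting loops by the closed form 50*n*n (0 for n ≤ 0).

-- ===== PORT A =====
-- 'while i < n' runs exactly (n - i).toNat more times; structural recursion on that count.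
-- Inner 'for j in range(50 * n): total += 1': j is unused, and range(m) iterates exactly
-- (m).toNat times, so it is ported exactly as a Nat.fold over that iteration count
-- performing the same 'total + 1' update each step (no list is materialized, as in Python).
def waffleLoop (n : Int) : Nat → Int → Int → Int
  | 0, _, total => total
  | k + 1, i, total =>
      waffleLoop n k (i + 1) (Nat.fold (50 * n).toNat (fun _ _ t => t + 1) total)

def waffle (n : Int) : Int := waffleLoop n (n - 0).toNat 0 0

-- ===== PORT B =====
def waffle_alt (n : Int) : Int := if n > 0 then 50 * n * n else 0

-- ===== PRECONDITION & SPEC =====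
def Spec_waffle (n : Int) (out : Int) : Prop := out = waffle_alt n
instance (n : Int) (out : Int) : Decidable (Spec_waffle n out) := by unfold Spec_waffle; infer_instance

-- ===== CLAIM (what is proved, stated in full; the proofs are below) =====
def Claim_equal_waffle : Prop := ∀ (n : Int), Dom_waffle n → Spec_waffle n (waffle n)

-- ===== LEMMAS AND PROOFS =====
theorem fold_add_one (m : Nat) (t : Int) :
    Nat.fold m (fun _ _ (a : Int) => a + 1) t = t + m := by
  induction m with
  | zero => simp
  | succ k ih => simp [Nat.fold_succ, ih]; push_cast; ring

theorem waffleLoop_closed (n : Int) (k : Nat) (i total : Int) :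
    waffleLoop n k i total = total + k * ((50 * n).toNat : Int) := by
  induction k generalizing i total with
  | zero => simp [waffleLoop]
  | succ m ih =>
      simp only [waffleLoop, ih, fold_add_one]
      push_cast
      ring

-- ===== VERDICT (by name: the statement is the Claim_ definition above) =====
theorem waffle_spec : Claim_equal_waffle := by
  intro n _
  unfold Spec_waffle waffle waffle_alt
  rw [waffleLoop_closed]
  by_cases h : n > 0
  · have h1 : ((n - 0).toNat : Int) = n := by omega
    have h2 : (((50 * n).toNat : Int)) = 50 * n := by omega
    rw [h1, h2]; simp [h]; ring
  · have h1 : (n - 0).toNat = 0 := by omega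
    rw [h1]; simp [h]
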